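-- pv_equiv track=rewrite | github.com/kayla-collab/short-cct | scripts/fix_bullets.py | extract_text_between
-- ===== SOURCE A (Python) =====
-- def extract_text_between(full_text, start_phrase, end_phrases):
--     """Extract text from start phrase until any of the end phrases."""
--     lines = full_text.split('\n')
--     result_lines = []
--     in_section = False
--
--     for i, line in enumerate(lines):
--         if not in_section:
--             if start_phrase in line:
--                 in_section = True
--                 result_lines.append(line)
--             continue
--
--         hit_end = False
--         for end_phrase in end_phrases:
--             if end_phrase != 'END_OF_DOCUMENT' and end_phrase in line:
--                 hit_end = True
--                 break
--
--         if hit_end: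
--             break
--
--         result_lines.append(line)
--
--     return '\n'.join(result_lines)
-- ===== SOURCE B (Python) =====
-- def extract_text_between(full_text, start_phrase, end_phrases):
--     """Extract text from start phrase until any of the end phrases."""
--     lines = full_text.split('\n')
--     start = None
--     for i, line in enumerate(lines):
--         if start_phrase in line:
--             start = i
--             break
--     if start is None:
--         return ''
--     tail = lines[start + 1:]
--     end = len(lines)
--     for j, line in enumerate(tail):
--         if any(e != 'END_OF_DOCUMENT' and e in line for e in end_phrases):
--             end = start + 1 + j
--             break
--     return '\n'.join(lines[start:end])
-- ===== Notes on version B (the rewrite author's own statement) =====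
-- stated objective: alternative
-- what changed: Replaces the single in_section state-machine pass with two separate find-first-index scans (start line, then first end line after it) plus a slice and one join.
import Mathlib
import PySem

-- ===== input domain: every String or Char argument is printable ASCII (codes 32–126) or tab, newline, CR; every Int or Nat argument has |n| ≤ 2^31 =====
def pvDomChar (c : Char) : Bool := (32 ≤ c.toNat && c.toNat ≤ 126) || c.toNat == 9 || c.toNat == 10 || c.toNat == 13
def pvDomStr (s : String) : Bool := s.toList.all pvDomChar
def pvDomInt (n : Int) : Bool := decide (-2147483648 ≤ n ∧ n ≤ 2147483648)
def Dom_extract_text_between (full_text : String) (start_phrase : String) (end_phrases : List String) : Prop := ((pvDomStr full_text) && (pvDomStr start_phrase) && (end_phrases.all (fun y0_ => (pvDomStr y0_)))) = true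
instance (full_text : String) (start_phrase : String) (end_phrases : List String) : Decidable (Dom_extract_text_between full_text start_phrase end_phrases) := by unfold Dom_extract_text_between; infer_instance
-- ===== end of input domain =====

-- B replaces A's single in_section state-machine pass by two find-first-index scans plus a slice (objective: alternative decomposition, same cost).

-- full_text.split('\n'): the separator is the nonempty literal "\n", so split? is always some; getD [] is unreachable
def pvSplitLines (full_text : String) : List String :=
  (PySem.Str.split? full_text "\n").getD []

-- ===== PORT A =====
-- inner 'for end_phrase in end_phrases: … break' of A, transliterated with the break as early return
def pvHitEndA (line : String) : List String → Bool
  | [] => false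
  | e :: rest =>
    if e != "END_OF_DOCUMENT" && PySem.Str.isIn e line then true
    else pvHitEndA line rest

-- A's main loop: state = (result_lines accumulator, in_section); 'break' ends the recursion
def pvLoopA (start_phrase : String) (end_phrases : List String) :
    List String → List String → Bool → List String
  | [], acc, _ => acc
  | line :: rest, acc, inSection =>
    if !inSection then
      if PySem.Str.isIn start_phrase line then
        pvLoopA start_phrase end_phrases rest (acc ++ [line]) true
      else pvLoopA start_phrase end_phrases rest acc inSection
    else
      if pvHitEndA line end_phrases then acc
      else pvLoopA start_phrase end_phrases rest (acc ++ [line]) inSection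

def extract_text_between (full_text : String) (start_phrase : String) (end_phrases : List String) : String :=
  PySem.Str.join "\n" (pvLoopA start_phrase end_phrases (pvSplitLines full_text) [] false)

-- ===== PORT B =====
-- Source B's 'any(e != "END_OF_DOCUMENT" and e in line for e in end_phrases)'
def pvIsEndB (end_phrases : List String) (line : String) : Bool :=
  end_phrases.any (fun e => e != "END_OF_DOCUMENT" && PySem.Str.isIn e line)

-- Source B's second loop: first end-line index strictly after s, defaulting to len(lines)
def pvEndIdx (end_phrases : List String) (lines : List String) (s : Nat) : Nat :=
  match (lines.drop (s+1)).findIdx? (pvIsEndB end_phrases) with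
  | some off => s + 1 + off
  | none => lines.length

def extract_text_between_alt (full_text : String) (start_phrase : String) (end_phrases : List String) : String :=
  -- first loop of Source B: first index whose line (of lines = full_text.split('\n')) contains start_phrase, else return ''
  match (pvSplitLines full_text).findIdx? (fun line => PySem.Str.isIn start_phrase line) with
  | none => ""
  | some s =>
    PySem.Str.join "\n" (((pvSplitLines full_text).take
      (pvEndIdx end_phrases (pvSplitLines full_text) s)).drop s)

-- ===== PRECONDITION & SPEC =====
def Spec_extract_text_between (full_text : String) (start_phrase : String) (end_phrases : List String) (out : String) : Prop := out = extract_text_between_alt full_text start_phrase end_phrases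
instance (full_text : String) (start_phrase : String) (end_phrases : List String) (out : String) : Decidable (Spec_extract_text_between full_text start_phrase end_phrases out) := by unfold Spec_extract_text_between; infer_instance

-- ===== CLAIM (what is proved, stated in full; the proofs are below) =====
def Claim_equal_extract_text_between : Prop := ∀ (full_text : String) (start_phrase : String) (end_phrases : List String), Dom_extract_text_between full_text start_phrase end_phrases → Spec_extract_text_between full_text start_phrase end_phrases (extract_text_between full_text start_phrase end_phrases)

-- ===== LEMMAS AND PROOFS =====

-- common characterisation of the extracted line list
def pvSpecList (start_phrase : String) (end_phrases : List String) : List String → List String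
  | [] => []
  | line :: rest =>
    if PySem.Str.isIn start_phrase line then
      line :: rest.takeWhile (fun l => !pvIsEndB end_phrases l)
    else pvSpecList start_phrase end_phrases rest

theorem pvHitEndA_eq (line : String) (eps : List String) :
    pvHitEndA line eps = pvIsEndB eps line := by
  induction eps with
  | nil => rfl
  | cons e rest ih =>
    cases hc : PySem.Chars.isIn e.toList line.toList <;>
      by_cases he : e = "END_OF_DOCUMENT" <;>
        simp [pvHitEndA, pvIsEndB, hc, he, ih, List.any_cons]

theorem pvLoopA_true (sp : String) (eps : List String) (lines acc : List String) :
    pvLoopA sp eps lines acc true = acc ++ lines.takeWhile (fun l => !pvIsEndB eps l) := by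
  induction lines generalizing acc with
  | nil => simp [pvLoopA]
  | cons l rest ih =>
    cases h : pvIsEndB eps l <;>
      simp [pvLoopA, pvHitEndA_eq, h, ih]

theorem pvLoopA_eq (sp : String) (eps : List String) (lines acc : List String) :
    pvLoopA sp eps lines acc false = acc ++ pvSpecList sp eps lines := by
  induction lines generalizing acc with
  | nil => simp [pvLoopA, pvSpecList]
  | cons l rest ih =>
    cases h : PySem.Chars.isIn sp.toList l.toList <;>
      simp [pvLoopA, pvSpecList, h, ih, pvLoopA_true]

theorem findIdx?_none_takeWhile (p : String → Bool) (t : List String)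
    (hf : t.findIdx? p = none) : t.takeWhile (fun l => !p l) = t := by
  induction t with
  | nil => rfl
  | cons x xs ih =>
    rw [List.findIdx?_cons] at hf
    cases h : p x with
    | true => rw [if_pos (by simp [h])] at hf; cases hf
    | false =>
      rw [if_neg (by simp [h]), Option.map_eq_none_iff] at hf
      simp [h, ih hf]

theorem findIdx?_some_takeWhile (p : String → Bool) (t : List String) (off : Nat)
    (hf : t.findIdx? p = some off) : t.takeWhile (fun l => !p l) = t.take off := by
  induction t generalizing off with
  | nil => simp at hf
  | cons x xs ih =>
    rw [List.findIdx?_cons] at hf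
    cases h : p x with
    | true =>
      rw [if_pos (by simp [h])] at hf
      cases hf
      simp [h]
    | false =>
      rw [if_neg (by simp [h]), Option.map_eq_some_iff] at hf
      obtain ⟨k, hk, rfl⟩ := hf
      simp [h, ih k hk, List.take_succ_cons]

theorem pvEndIdx_zero (eps : List String) (l : String) (rest : List String) :
    (l :: rest).take (pvEndIdx eps (l :: rest) 0) =
      l :: rest.takeWhile (fun s => !pvIsEndB eps s) := by
  unfold pvEndIdx
  have hd : (l :: rest).drop (0+1) = rest := rfl
  rw [hd]
  cases hf : rest.findIdx? (pvIsEndB eps) with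
  | none =>
    rw [findIdx?_none_takeWhile _ _ hf]
    simp
  | some off =>
    rw [findIdx?_some_takeWhile _ _ _ hf]
    show List.take (0 + 1 + off) (l :: rest) = l :: List.take off rest
    have h1 : 0 + 1 + off = off + 1 := by omega
    rw [h1, List.take_succ_cons]

theorem pvEndIdx_succ (eps : List String) (l : String) (rest : List String) (s : Nat) :
    pvEndIdx eps (l :: rest) (s+1) = pvEndIdx eps rest s + 1 := by
  unfold pvEndIdx
  have hd : (l :: rest).drop (s+1+1) = rest.drop (s+1) := rfl
  rw [hd]
  cases hf : (rest.drop (s+1)).findIdx? (pvIsEndB eps)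
  · simp
  · simp; omega

theorem pvBList_eq (sp : String) (eps : List String) (lines : List String) :
    (match lines.findIdx? (fun line => PySem.Chars.isIn sp.toList line.toList) with
      | none => []
      | some s => (lines.take (pvEndIdx eps lines s)).drop s) = pvSpecList sp eps lines := by
  induction lines with
  | nil => rfl
  | cons l rest ih =>
    cases h : PySem.Chars.isIn sp.toList l.toList with
    | true =>
      have hfc : (l :: rest).findIdx? (fun line => PySem.Chars.isIn sp.toList line.toList) = some 0 := by
        simp [List.findIdx?_cons, h]
      rw [hfc]
      simp only [List.drop_zero]
      rw [pvEndIdx_zero]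
      simp [pvSpecList, h]
    | false =>
      have hfc : (l :: rest).findIdx? (fun line => PySem.Chars.isIn sp.toList line.toList) =
          (rest.findIdx? (fun line => PySem.Chars.isIn sp.toList line.toList)).map (· + 1) := by
        simp [List.findIdx?_cons, h]
      rw [hfc]
      cases hf : rest.findIdx? (fun line => PySem.Chars.isIn sp.toList line.toList) with
      | none =>
        rw [hf] at ih
        simp [pvSpecList, h, ih]
      | some s =>
        rw [hf] at ih
        simp only [Option.map_some, pvEndIdx_succ, List.take_succ_cons, List.drop_succ_cons]
        simp only at ih
        rw [ih]
        simp [pvSpecList, h]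

-- ===== VERDICT (by name: the statement is the Claim_ definition above) =====
theorem extract_text_between_spec : Claim_equal_extract_text_between := by
  intro full_text start_phrase end_phrases _
  unfold Spec_extract_text_between extract_text_between extract_text_between_alt
  rw [pvLoopA_eq, List.nil_append]
  have heq : (fun line => PySem.Str.isIn start_phrase line) =
      (fun line => PySem.Chars.isIn start_phrase.toList line.toList) := by
    funext l; simp
  rw [heq]
  have hb := pvBList_eq start_phrase end_phrases (pvSplitLines full_text)
  cases hf : (pvSplitLines full_text).findIdx?
      (fun line => PySem.Chars.isIn start_phrase.toList line.toList) with
  | none =>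
    rw [hf] at hb
    have hb' : ([] : List String) = pvSpecList start_phrase end_phrases (pvSplitLines full_text) := hb
    show PySem.Str.join "\n" (pvSpecList start_phrase end_phrases (pvSplitLines full_text)) = ""
    rw [← hb']
    decide
  | some s =>
    rw [hf] at hb
    have hb' : ((pvSplitLines full_text).take
        (pvEndIdx end_phrases (pvSplitLines full_text) s)).drop s =
        pvSpecList start_phrase end_phrases (pvSplitLines full_text) := hb
    show PySem.Str.join "\n" (pvSpecList start_phrase end_phrases (pvSplitLines full_text)) =
      PySem.Str.join "\n" (((pvSplitLines full_text).take
        (pvEndIdx end_phrases (pvSplitLines full_text) s)).drop s)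
    rw [hb']
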